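-- pv_equiv track=rewrite | github.com/rrwick/Small-plasmid-Nanopore | scripts/assign_reads.py | get_chimera_types
-- ===== SOURCE A (Python) =====
-- import collections
--
-- def get_chimera_types(reference_names):
--     chimera = 'yes' if len(reference_names) > 1 else 'no'
--
--     per_genome = collections.defaultdict(int)
--     for r in reference_names:
--         genome_name = r.split('__')[0]
--         per_genome[genome_name] += 1
--
--     cross_bin_chimera = 'yes' if len(per_genome) > 1 else 'no'
--     within_bin_chimera = 'yes' if any(count > 1 for count in per_genome.values()) else 'no'
--
--     return chimera, cross_bin_chimera, within_bin_chimera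
-- ===== SOURCE B (Python) =====
-- def get_chimera_types(reference_names):
--     s = sorted(r.split('__')[0] for r in reference_names)
--     adjacent = list(zip(s, s[1:]))
--     chimera = 'yes' if len(reference_names) > 1 else 'no'
--     cross_bin_chimera = 'yes' if any(a != b for a, b in adjacent) else 'no'
--     within_bin_chimera = 'yes' if any(a == b for a, b in adjacent) else 'no'
--     return chimera, cross_bin_chimera, within_bin_chimera
-- ===== Notes on version B (the rewrite author's own statement) =====
-- stated objective: alternative
-- what changed: Sort-then-adjacent-scan instead of hash counting: sorting the genome prefixes makes equal genomes adjacent, so within-bin chimerism is 'some adjacent pair equal' and cross-bin is 'some adjacent pair unequal', eliminating the defaultdict and the count scan entirely.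
import Mathlib
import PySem

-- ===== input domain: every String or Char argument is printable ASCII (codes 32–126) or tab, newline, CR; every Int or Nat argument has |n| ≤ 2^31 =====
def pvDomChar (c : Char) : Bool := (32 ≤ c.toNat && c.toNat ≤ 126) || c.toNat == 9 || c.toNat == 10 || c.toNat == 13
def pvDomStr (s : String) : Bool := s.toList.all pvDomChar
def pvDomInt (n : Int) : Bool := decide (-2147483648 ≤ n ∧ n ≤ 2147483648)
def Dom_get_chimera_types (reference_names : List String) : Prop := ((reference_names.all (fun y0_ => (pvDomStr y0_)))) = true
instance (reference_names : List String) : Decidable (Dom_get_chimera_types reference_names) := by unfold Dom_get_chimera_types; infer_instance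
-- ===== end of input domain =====

-- B sorts the genome prefixes and scans adjacent pairs (equal pair = within-bin, unequal
-- pair = cross-bin) instead of A's defaultdict counting loop (objective: alternative).

-- ===== PORT A =====
-- r.split('__')[0]: split? with the nonempty separator '__' is always some and never [], so getD/headD are exact
def pvGenomeA (r : String) : String := ((PySem.Str.split? r "__").getD []).headD ""

def get_chimera_types (reference_names : List String) : String × String × String :=
  let chimera := if reference_names.length > 1 then "yes" else "no"
  -- per_genome = defaultdict(int); per_genome[genome_name] += 1
  let per_genome : PySem.Dict String Int :=
    reference_names.foldl (fun d r => d.modify (pvGenomeA r) 0 (fun c => c + 1)) PySem.Dict.empty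
  let cross_bin_chimera := if per_genome.size > 1 then "yes" else "no"
  let within_bin_chimera := if per_genome.values.any (fun c => decide ((1 : Int) < c)) then "yes" else "no"
  (chimera, cross_bin_chimera, within_bin_chimera)

-- ===== PORT B =====
def get_chimera_types_alt (reference_names : List String) : String × String × String :=
  let s := PySem.List.sorted (reference_names.map (fun r => ((PySem.Str.split? r "__").getD []).headD "")) (fun x => x) false
  let adjacent := s.zip (PySem.List.slice s (some 1) none)   -- zip(s, s[1:])
  let chimera := if reference_names.length > 1 then "yes" else "no"
  let cross_bin_chimera := if adjacent.any (fun p => p.1 != p.2) then "yes" else "no"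
  let within_bin_chimera := if adjacent.any (fun p => p.1 == p.2) then "yes" else "no"
  (chimera, cross_bin_chimera, within_bin_chimera)

-- ===== PRECONDITION & SPEC =====
def Spec_get_chimera_types (reference_names : List String) (out : String × String × String) : Prop := out = get_chimera_types_alt reference_names
instance (reference_names : List String) (out : String × String × String) : Decidable (Spec_get_chimera_types reference_names out) := by unfold Spec_get_chimera_types; infer_instance

-- ===== CLAIM =====
def Claim_equal_get_chimera_types : Prop := ∀ (reference_names : List String), Dom_get_chimera_types reference_names → Spec_get_chimera_types reference_names (get_chimera_types reference_names)

-- ===== LEMMAS AND PROOFS =====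

-- in a ≤-sorted list, an adjacent equal pair exists iff the list has a duplicate
theorem pv_adj_eq_iff (s : List String) (hs : s.Pairwise (· ≤ ·)) :
    ((s.zip s.tail).any (fun p => p.1 == p.2) = true) ↔ ¬ s.Nodup := by
  induction s with
  | nil => simp
  | cons a t ih =>
    rcases List.pairwise_cons.mp hs with ⟨hat, hpt⟩
    cases t with
    | nil => simp
    | cons b t2 =>
      have iht := ih hpt
      simp only [List.tail_cons, List.zip_cons_cons, List.any_cons, Bool.or_eq_true,
        beq_iff_eq, List.nodup_cons] at *
      constructor
      · rintro (hab | hany)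
        · intro hnd; exact hnd.1 (by simp [hab])
        · intro hnd; exact (iht.mp hany) hnd.2
      · intro hnd
        by_cases hmem : a ∈ b :: t2
        · left
          have hab : a ≤ b := hat b (by simp)
          have hba : b ≤ a := by
            rcases List.mem_cons.mp hmem with h | h
            · exact le_of_eq h.symm
            · exact (List.pairwise_cons.mp hpt).1 a h
          exact le_antisymm hab hba
        · right
          exact iht.mpr (fun h2 => hnd ⟨hmem, h2⟩)

-- in a ≤-sorted list, an adjacent unequal pair exists iff not all elements are equal
theorem pv_adj_ne_iff (s : List String) (hs : s.Pairwise (· ≤ ·)) :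
    ((s.zip s.tail).any (fun p => p.1 != p.2) = true) ↔ ¬ (∀ a ∈ s, ∀ b ∈ s, a = b) := by
  induction s with
  | nil => simp
  | cons a t ih =>
    rcases List.pairwise_cons.mp hs with ⟨_, hpt⟩
    cases t with
    | nil => simp
    | cons b t2 =>
      have iht := ih hpt
      simp only [List.tail_cons, List.zip_cons_cons, List.any_cons, Bool.or_eq_true,
        bne_iff_ne, ne_eq] at *
      constructor
      · rintro (hab | hany) hall
        · exact hab (hall a (by simp) b (by simp))
        · exact (iht.mp hany) (fun x hx y hy =>
            hall x (List.mem_cons_of_mem a hx) y (List.mem_cons_of_mem a hy))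
      · intro hall
        by_cases hab : a = b
        · right
          apply iht.mpr
          intro h2
          apply hall
          intro x hx y hy
          have hx' : x = b := by
            rcases List.mem_cons.mp hx with h | h
            · rw [h, hab]
            · exact h2 x h b (by simp)
          have hy' : y = b := by
            rcases List.mem_cons.mp hy with h | h
            · rw [h, hab]
            · exact h2 y h b (by simp)
          rw [hx', hy']
        · exact Or.inl hab

-- two distinct members exist iff a nodup enumeration of the members is longer than 1
theorem pv_two_iff (u g : List String) (hnd : u.Nodup) (hmem : ∀ x, x ∈ u ↔ x ∈ g) :
    (u.length > 1) ↔ ¬ (∀ a ∈ g, ∀ b ∈ g, a = b) := by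
  constructor
  · intro h hall
    rcases u with _ | ⟨x, _ | ⟨y, rest⟩⟩
    · simp at h
    · simp at h
    · have hx : x ∈ g := (hmem x).mp (by simp)
      have hy : y ∈ g := (hmem y).mp (by simp)
      have hxy : x ≠ y := by
        simp only [List.nodup_cons, List.mem_cons] at hnd
        exact fun h' => hnd.1 (Or.inl h')
      exact hxy (hall x hx y hy)
  · intro h
    by_contra hle
    apply h
    intro a ha b hb
    have ha' := (hmem a).mpr ha
    have hb' := (hmem b).mpr hb
    rcases u with _ | ⟨x, _ | ⟨y, rest⟩⟩
    · simp at ha'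
    · simp at ha' hb'; rw [ha', hb']
    · simp at hle

-- A's counter size > 1 iff not all elements equal
theorem pv_size_iff (g : List String) :
    ((PySem.Dict.counter g).size > 1) ↔ ¬ (∀ a ∈ g, ∀ b ∈ g, a = b) := by
  have hsz : (PySem.Dict.counter g).size = (PySem.Set.ofList g).length := by
    simp [PySem.Dict.size, PySem.Dict.items_counter]
  rw [hsz]
  exact pv_two_iff (PySem.Set.ofList g) g (PySem.Set.nodup_ofList g)
    (fun x => PySem.Set.mem_ofList g x)

-- A's any(count>1) iff g has a duplicate
theorem pv_within_iff (g : List String) :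
    ((PySem.Dict.counter g).values.any (fun c => decide ((1 : Int) < c)) = true) ↔ ¬ g.Nodup := by
  have hv : (PySem.Dict.counter g).values
      = (PySem.Set.ofList g).map (fun k => ((g.count k : Int))) := by
    simp [PySem.Dict.values, PySem.Dict.items_counter, List.map_map, Function.comp]
  rw [hv, List.any_map]
  simp only [Function.comp_def, List.any_eq_true, decide_eq_true_eq]
  constructor
  · rintro ⟨k, _, hk⟩ hnd
    have h1 := List.nodup_iff_count_le_one.mp hnd k
    have : (1 : Int) < (g.count k : Int) := hk
    omega
  · intro h
    rcases not_forall.mp (fun hall => h (List.nodup_iff_count_le_one.mpr hall)) with ⟨k, hk⟩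
    have hk' : 1 < g.count k := lt_of_not_ge hk
    refine ⟨k, ?_, by exact_mod_cast hk'⟩
    exact (PySem.Set.mem_ofList g k).mpr (List.count_pos_iff.mp (by omega))

-- ===== VERDICT =====
theorem get_chimera_types_spec : Claim_equal_get_chimera_types := by
  intro rn _
  show get_chimera_types rn = get_chimera_types_alt rn
  simp only [get_chimera_types, get_chimera_types_alt, PySem.List.slice_from_one]
  set g := rn.map (fun r => ((PySem.Str.split? r "__").getD []).headD "") with hg
  set s := PySem.List.sorted g (fun x => x) false with hsdef
  have hperm : s.Perm g := PySem.List.sorted_perm g (fun x => x) false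
  have hpw : s.Pairwise (· ≤ ·) := by
    have := PySem.List.sorted_pairwise g (fun x => x)
    simpa using this
  have hfold : rn.foldl (fun d r => d.modify (pvGenomeA r) 0 (fun c => c + 1)) PySem.Dict.empty
      = PySem.Dict.counter g := by
    rw [PySem.Dict.counter_eq_foldl, hg, List.foldl_map]; rfl
  rw [hfold]
  refine Prod.ext rfl (Prod.ext ?_ ?_)
  · -- cross-bin
    show (if (PySem.Dict.counter g).size > 1 then "yes" else "no")
        = (if (s.zip s.tail).any (fun p => p.1 != p.2) then "yes" else "no")
    have h1 := pv_size_iff g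
    have h2 := pv_adj_ne_iff s hpw
    have hmem : (∀ a ∈ s, ∀ b ∈ s, a = b) ↔ (∀ a ∈ g, ∀ b ∈ g, a = b) := by
      constructor <;> intro h a ha b hb
      · exact h a (hperm.mem_iff.mpr ha) b (hperm.mem_iff.mpr hb)
      · exact h a (hperm.mem_iff.mp ha) b (hperm.mem_iff.mp hb)
    by_cases hc : (PySem.Dict.counter g).size > 1
    · rw [if_pos hc, if_pos (h2.mpr (fun h => (h1.mp hc) (hmem.mp h)))]
    · rw [if_neg hc]
      rw [if_neg]
      intro hany
      exact hc (h1.mpr (fun h => (h2.mp hany) (hmem.mpr h)))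
  · -- within-bin
    show (if (PySem.Dict.counter g).values.any (fun c => decide ((1 : Int) < c)) then "yes" else "no")
        = (if (s.zip s.tail).any (fun p => p.1 == p.2) then "yes" else "no")
    have h1 := pv_within_iff g
    have h2 := pv_adj_eq_iff s hpw
    have hnd : s.Nodup ↔ g.Nodup := hperm.nodup_iff
    by_cases hc : (PySem.Dict.counter g).values.any (fun c => decide ((1 : Int) < c)) = true
    · rw [if_pos hc, if_pos (h2.mpr (fun h => (h1.mp hc) (hnd.mp h)))]
    · rw [if_neg hc, if_neg]
      intro hany
      exact hc (h1.mpr (fun h => (h2.mp hany) (hnd.mpr h)))
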